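-- pv_equiv track=rewrite | github.com/avin0160/context-aware-doc-generator | comprehensive_docs_advanced.py | _generate_module_interaction_diagram
-- ===== SOURCE A (Python) =====
-- from typing import Dict, List, Tuple, Any, Optional, Set
--
-- def _generate_module_interaction_diagram(analysis: Dict[str, Any]) -> str:
--     """Generate module interaction ASCII diagram"""
--     files = list(analysis['file_analysis'].keys())[:6]
--
--     diagram = ""
--     for i, file_path in enumerate(files):
--         file_name = file_path.split('/')[-1].replace('.py', '')
--         diagram += f"[{file_name}]"
--         if i < len(files) - 1:
--             diagram += " ──→ "
--         if (i + 1) % 3 == 0 and i < len(files) - 1: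
--             diagram += "\n    ↓        ↓\n"
--
--     return diagram
-- ===== SOURCE B (Python) =====
-- def _generate_module_interaction_diagram(analysis):
--     """Generate module interaction ASCII diagram"""
--     names = [p.split('/')[-1].replace('.py', '')
--              for p in list(analysis['file_analysis'])[:6]]
--     rows = [names[k:k + 3] for k in range(0, len(names), 3)]
--     return " \u2500\u2500\u2192 \n    \u2193        \u2193\n".join(
--         " \u2500\u2500\u2192 ".join(f"[{n}]" for n in row) for row in rows)
-- ===== Notes on version B (the rewrite author's own statement) =====
-- stated objective: simpler
-- what changed: B replaces A's single stateful loop with enumerate-indexed conditional separator appends by a declarative pipeline: map the cleaned names, chunk them into rows of three, and join brackets/rows with fixed separators.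
import Mathlib
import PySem

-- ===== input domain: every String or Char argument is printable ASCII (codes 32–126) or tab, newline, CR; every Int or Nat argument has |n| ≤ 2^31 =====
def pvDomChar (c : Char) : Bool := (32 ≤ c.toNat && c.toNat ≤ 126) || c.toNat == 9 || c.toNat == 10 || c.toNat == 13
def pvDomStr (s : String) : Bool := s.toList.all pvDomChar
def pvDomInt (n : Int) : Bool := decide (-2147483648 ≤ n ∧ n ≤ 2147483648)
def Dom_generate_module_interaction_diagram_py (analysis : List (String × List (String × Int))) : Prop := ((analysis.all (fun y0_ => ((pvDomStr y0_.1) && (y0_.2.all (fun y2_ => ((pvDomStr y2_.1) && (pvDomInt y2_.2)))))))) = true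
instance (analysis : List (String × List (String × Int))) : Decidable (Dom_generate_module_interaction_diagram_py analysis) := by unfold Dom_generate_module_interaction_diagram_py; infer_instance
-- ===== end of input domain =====

-- B rebuilds the diagram as chunk-rows-of-three joined with fixed separators instead of A's indexed loop with conditional appends (objective: simpler).
-- ===== PORT A =====
def generate_module_interaction_diagram_py (analysis : List (String × List (String × Int))) : String :=
  let inner := ((analysis.find? (fun p => p.1 == "file_analysis")).map (·.2)).getD []
  let files := (inner.map (·.1)).take 6
  (PySem.List.enumerate files).foldl
    (fun diagram ip =>
      let file_name := PySem.Str.replace (((PySem.Str.split? ip.2 "/").getD []).getLastD "") ".py" ""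
      let d1 := diagram ++ "[" ++ file_name ++ "]"
      let d2 := if ip.1 < (files.length : Int) - 1 then d1 ++ " \u2500\u2500\u2192 " else d1
      if PySem.Int.mod (ip.1 + 1) 3 == 0 && decide (ip.1 < (files.length : Int) - 1) then d2 ++ "\n    \u2193        \u2193\n" else d2)
    ""

-- ===== PORT B =====
def generate_module_interaction_diagram_py_alt (analysis : List (String × List (String × Int))) : String :=
  let inner := ((analysis.find? (fun p => p.1 == "file_analysis")).map (·.2)).getD []
  let names := ((inner.map (·.1)).take 6).map
    (fun p => PySem.Str.replace (((PySem.Str.split? p "/").getD []).getLastD "") ".py" "")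
  let rows := (PySem.List.pyRange 0 (names.length : Int) 3).map
    (fun k => PySem.List.slice names (some k) (some (k + 3)))
  PySem.Str.join " \u2500\u2500\u2192 \n    \u2193        \u2193\n"
    (rows.map (fun row => PySem.Str.join " \u2500\u2500\u2192 " (row.map (fun n => "[" ++ n ++ "]"))))

-- ===== PRECONDITION & SPEC =====
-- Pre_ excludes inputs lacking the key 'file_analysis', on which Python A raises KeyError (B raises too).
def Pre_generate_module_interaction_diagram_py (analysis : List (String × List (String × Int))) : Prop :=
  (analysis.map (·.1)).contains "file_analysis" = true
instance (analysis : List (String × List (String × Int))) : Decidable (Pre_generate_module_interaction_diagram_py analysis) := by unfold Pre_generate_module_interaction_diagram_py; infer_instance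
def pvWitness_generate_module_interaction_diagram_py : (List (String × List (String × Int))) := [("file_analysis", [("a.py", 0)])]
def Spec_generate_module_interaction_diagram_py (analysis : List (String × List (String × Int))) (out : String) : Prop := out = generate_module_interaction_diagram_py_alt analysis
instance (analysis : List (String × List (String × Int))) (out : String) : Decidable (Spec_generate_module_interaction_diagram_py analysis out) := by unfold Spec_generate_module_interaction_diagram_py; infer_instance

-- ===== CLAIM (what is proved, stated in full; the proofs are below) =====
def Claim_equal_generate_module_interaction_diagram_py : Prop := ∀ (analysis : List (String × List (String × Int))), Dom_generate_module_interaction_diagram_py analysis → Pre_generate_module_interaction_diagram_py analysis → Spec_generate_module_interaction_diagram_py analysis (generate_module_interaction_diagram_py analysis)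

-- ===== LEMMAS AND PROOFS =====

theorem pvLit : " \u2500\u2500\u2192 ".toList ++ "\n    \u2193        \u2193\n".toList = " \u2500\u2500\u2192 \n    \u2193        \u2193\n".toList := by decide

theorem pvCore_eq (files : List String) (h : files.length ≤ 6) :
    (PySem.List.enumerate files).foldl
      (fun diagram ip =>
        let file_name := PySem.Str.replace (((PySem.Str.split? ip.2 "/").getD []).getLastD "") ".py" ""
        let d1 := diagram ++ "[" ++ file_name ++ "]"
        let d2 := if ip.1 < (files.length : Int) - 1 then d1 ++ " \u2500\u2500\u2192 " else d1
        if PySem.Int.mod (ip.1 + 1) 3 == 0 && decide (ip.1 < (files.length : Int) - 1) then d2 ++ "\n    \u2193        \u2193\n" else d2)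
      ""
    =
    (let names := files.map (fun p => PySem.Str.replace (((PySem.Str.split? p "/").getD []).getLastD "") ".py" "")
     let rows := (PySem.List.pyRange 0 (names.length : Int) 3).map
       (fun k => PySem.List.slice names (some k) (some (k + 3)))
     PySem.Str.join " \u2500\u2500\u2192 \n    \u2193        \u2193\n"
       (rows.map (fun row => PySem.Str.join " \u2500\u2500\u2192 " (row.map (fun n => "[" ++ n ++ "]"))))) := by
  match files, h with
  | [], _ =>
    rw [← String.toList_inj]
    norm_num [PySem.List.enumerate, PySem.Int.mod, PySem.Str.join, PySem.Chars.join,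
      PySem.List.pyRange, PySem.List.slice, PySem.List.clampIdx, Int.fmod, List.intercalate,
      List.range_succ, String.toList_ofList, Int.toNat, List.intersperse, List.flatten, pvLit]
  | [a1], _ =>
    rw [← String.toList_inj]
    norm_num [PySem.List.enumerate, PySem.Int.mod, PySem.Str.join, PySem.Chars.join,
      PySem.List.pyRange, PySem.List.slice, PySem.List.clampIdx, Int.fmod, List.intercalate,
      List.range_succ, String.toList_ofList, Int.toNat, List.intersperse, List.flatten, pvLit]
  | [a1,a2], _ =>
    rw [← String.toList_inj]
    norm_num [PySem.List.enumerate, PySem.Int.mod, PySem.Str.join, PySem.Chars.join,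
      PySem.List.pyRange, PySem.List.slice, PySem.List.clampIdx, Int.fmod, List.intercalate,
      List.range_succ, String.toList_ofList, Int.toNat, List.intersperse, List.flatten, pvLit]
  | [a1,a2,a3], _ =>
    rw [← String.toList_inj]
    norm_num [PySem.List.enumerate, PySem.Int.mod, PySem.Str.join, PySem.Chars.join,
      PySem.List.pyRange, PySem.List.slice, PySem.List.clampIdx, Int.fmod, List.intercalate,
      List.range_succ, String.toList_ofList, Int.toNat, List.intersperse, List.flatten, pvLit]
  | [a1,a2,a3,a4], _ =>
    rw [← String.toList_inj]
    norm_num [PySem.List.enumerate, PySem.Int.mod, PySem.Str.join, PySem.Chars.join,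
      PySem.List.pyRange, PySem.List.slice, PySem.List.clampIdx, Int.fmod, List.intercalate,
      List.range_succ, String.toList_ofList, Int.toNat, List.intersperse, List.flatten, pvLit]
  | [a1,a2,a3,a4,a5], _ =>
    rw [← String.toList_inj]
    norm_num [PySem.List.enumerate, PySem.Int.mod, PySem.Str.join, PySem.Chars.join,
      PySem.List.pyRange, PySem.List.slice, PySem.List.clampIdx, Int.fmod, List.intercalate,
      List.range_succ, String.toList_ofList, Int.toNat, List.intersperse, List.flatten, pvLit]
  | [a1,a2,a3,a4,a5,a6], _ =>
    rw [← String.toList_inj]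
    norm_num [PySem.List.enumerate, PySem.Int.mod, PySem.Str.join, PySem.Chars.join,
      PySem.List.pyRange, PySem.List.slice, PySem.List.clampIdx, Int.fmod, List.intercalate,
      List.range_succ, String.toList_ofList, Int.toNat, List.intersperse, List.flatten, pvLit]
  | a1 :: a2 :: a3 :: a4 :: a5 :: a6 :: a7 :: rest, h => simp at h; omega

-- ===== VERDICT (by name: the statement is the Claim_ definition above) =====
theorem generate_module_interaction_diagram_py_spec : Claim_equal_generate_module_interaction_diagram_py := by
  intro analysis _ _
  unfold Spec_generate_module_interaction_diagram_py generate_module_interaction_diagram_py generate_module_interaction_diagram_py_alt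
  exact pvCore_eq _ (List.length_take_le _ _)
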